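-- pv_equiv track=rewrite | github.com/niveditaprity/DSA-Bootcamp | JyotiKumari/Array(GFG)/First repeating element.py | firstRepeated
-- ===== SOURCE A (Python) =====
-- from collections import OrderedDict
--
-- def firstRepeated(arr, n):
--
--     #arr : given array
--     #n : size of the array
--     d = OrderedDict()
--     for element in arr:
--         d[element] = 0
--     for element in arr:
--         d[element]+=1
--     index = 1
--     for element in d:
--         if(d[element]>1):
--             return index
--         index+=1
--     return -1
-- ===== SOURCE B (Python) =====
-- def firstRepeated(arr, n):
--     # No frequency table: walk positions; at a first occurrence (no earlier copy)
--     # test directly whether the element occurs again later; rank first occurrences.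
--     pos = 1
--     for i, x in enumerate(arr):
--         if arr.index(x) == i:          # i is x's first occurrence
--             if x in arr[i + 1:]:       # x occurs again later => repeated
--                 return pos
--             pos += 1
--     return -1
-- ===== Notes on version B (the rewrite author's own statement) =====
-- stated objective: alternative
-- what changed: Drops A's frequency dictionary entirely: B walks positions once and, at each first occurrence (detected by arr.index), decides repetition by a direct membership test in the remaining suffix, ranking first occurrences as it goes.
import Mathlib
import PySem

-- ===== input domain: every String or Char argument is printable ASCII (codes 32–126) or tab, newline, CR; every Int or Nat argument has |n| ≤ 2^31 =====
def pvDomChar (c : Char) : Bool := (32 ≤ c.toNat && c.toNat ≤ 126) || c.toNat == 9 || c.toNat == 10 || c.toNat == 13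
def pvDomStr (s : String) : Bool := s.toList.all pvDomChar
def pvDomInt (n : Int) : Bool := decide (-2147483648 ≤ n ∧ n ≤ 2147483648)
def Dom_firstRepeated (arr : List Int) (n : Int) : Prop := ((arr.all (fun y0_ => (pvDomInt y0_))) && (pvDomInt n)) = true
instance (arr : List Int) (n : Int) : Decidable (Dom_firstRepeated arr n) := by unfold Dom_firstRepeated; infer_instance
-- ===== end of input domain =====

-- B drops A's OrderedDict frequency table entirely: one positional walk that detects a
-- first occurrence with arr.index and tests repetition by membership in the remaining
-- suffix (alternative decomposition; quadratic instead of A's hashed counting).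


-- ===== PORT A =====
-- third loop of A: for element in d: if d[element] > 1: return index; index += 1
def pvScanA (d : PySem.Dict Int Int) : List Int → Int → Int
  | [], _ => -1
  | element :: rest, index =>
    if d.getD element 0 > 1 then index else pvScanA d rest (index + 1)

def firstRepeated (arr : List Int) (_n : Int) : Int :=
  let d0 : PySem.Dict Int Int := arr.foldl (fun d element => d.insert element (0 : Int)) PySem.Dict.empty
  let d : PySem.Dict Int Int := arr.foldl (fun d element => d.modify element 0 (· + 1)) d0
  pvScanA d d.keys 1

-- ===== PORT B =====
-- B's loop: for i, x in enumerate(arr): if arr.index(x) == i: if x in arr[i+1:]: return pos; pos += 1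
def pvBLoop (arr : List Int) : List (Int × Int) → Int → Int
  | [], _ => -1
  | (i, x) :: rest, pos =>
    if Option.map (fun k : Nat => (k : Int)) (PySem.List.index? arr x) = some i then
      if x ∈ PySem.List.slice arr (some (i + 1)) none then pos
      else pvBLoop arr rest (pos + 1)
    else pvBLoop arr rest pos

def firstRepeated_alt (arr : List Int) (_n : Int) : Int :=
  pvBLoop arr (PySem.List.enumerate arr 0) 1

-- ===== PRECONDITION & SPEC =====
def Spec_firstRepeated (arr : List Int) (n : Int) (out : Int) : Prop := out = firstRepeated_alt arr n
instance (arr : List Int) (n : Int) (out : Int) : Decidable (Spec_firstRepeated arr n out) := by unfold Spec_firstRepeated; infer_instance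

-- ===== CLAIM (what is proved, stated in full; the proofs are below) =====
def Claim_equal_firstRepeated : Prop := ∀ (arr : List Int) (n : Int), Dom_firstRepeated arr n → Spec_firstRepeated arr n (firstRepeated arr n)

-- ===== LEMMAS AND PROOFS =====

-- abstract scan: over a key list, with the predicate "count in arr > 1"
def pvScanP (arr : List Int) : List Int → Int → Int
  | [], _ => -1
  | e :: rest, idx => if (arr.count e : Int) > 1 then idx else pvScanP arr rest (idx + 1)

-- the fresh (not-yet-seen) elements of a walk, in first-occurrence order
def pvDedupNew : List Int → PySem.Set Int → List Int
  | [], _ => []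
  | e :: rest, s =>
    if PySem.Set.contains s e then pvDedupNew rest s
    else e :: pvDedupNew rest (PySem.Set.add s e)

theorem pvGetD_insert0 (arr : List Int) (v : Int) (d : PySem.Dict Int Int)
    (h : d.getD v 0 = 0) :
    (arr.foldl (fun d element => d.insert element 0) d).getD v 0 = 0 := by
  induction arr generalizing d with
  | nil => simpa using h
  | cons e rest ih =>
    simp only [List.foldl_cons]
    exact ih _ (by rw [PySem.Dict.getD_insert]; split <;> simp [h])

theorem pvScanA_eq_scanP (arr : List Int) (dd : PySem.Dict Int Int)
    (h : ∀ e, dd.getD e 0 = arr.count e) :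
    ∀ (ks : List Int) (idx : Int), pvScanA dd ks idx = pvScanP arr ks idx := by
  intro ks
  induction ks with
  | nil => intro idx; rfl
  | cons e rest ih =>
    intro idx
    simp only [pvScanA, pvScanP, h e]
    split <;> simp [ih]

theorem pvUpdate_eq_dedupNew :
    ∀ (l : List Int) (s : PySem.Set Int),
      PySem.Set.update s l = s ++ pvDedupNew l s := by
  intro l
  induction l with
  | nil => intro s; simp [PySem.Set.update_nil, pvDedupNew]
  | cons e rest ih =>
    intro s
    rw [PySem.Set.update_cons, ih]
    by_cases hm : PySem.Set.contains s e = true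
    · have hmem : e ∈ s := by rwa [PySem.Set.contains_iff] at hm
      simp [pvDedupNew, hmem, PySem.Set.add_of_mem]
    · have hnm : e ∉ s := by rw [← PySem.Set.contains_iff]; exact hm
      simp [pvDedupNew, hnm]

theorem pvDedupNew_nil (arr : List Int) :
    pvDedupNew arr PySem.Set.empty = PySem.Set.ofList arr := by
  have := pvUpdate_eq_dedupNew arr PySem.Set.empty
  rw [PySem.Set.update_empty] at this
  simpa using this.symm

theorem pvUpdate_ofList_self (arr : List Int) :
    PySem.Set.update (PySem.Set.ofList arr) arr = PySem.Set.ofList arr := by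
  rw [PySem.Set.update_eq_append_filter]
  have : (PySem.Set.ofList arr).filter
      (fun y => !(PySem.Set.contains (PySem.Set.ofList arr) y)) = [] := by
    apply List.filter_eq_nil_iff.mpr
    intro y hy
    rw [PySem.Set.mem_ofList] at hy
    simp [PySem.Set.mem_ofList, hy]
  simp [this]

-- B's positional walk over a suffix equals the abstract scan over that suffix's fresh elements
theorem pvBLoop_eq_scanP (arr : List Int) :
    ∀ (l : List Int) (k : Nat) (pos : Int), List.drop k arr = l →
      pvBLoop arr (PySem.List.enumerate l (k : Int)) pos
        = pvScanP arr (pvDedupNew l (PySem.Set.ofList (arr.take k))) pos := by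
  intro l
  induction l with
  | nil => intro k pos _; rfl
  | cons x rest ih =>
    intro k pos h
    have hk : k < arr.length := by
      by_contra hge
      rw [List.drop_eq_nil_of_le (by omega)] at h
      simp at h
    have hget : arr[k]? = some x := by
      have h2 : (List.drop k arr)[0]? = some x := by rw [h]; rfl
      simpa using h2
    have hdrop1 : List.drop (k + 1) arr = rest := by
      have h2 : List.drop 1 (List.drop k arr) = rest := by rw [h]; rfl
      rw [List.drop_drop] at h2
      simpa [Nat.add_comm] using h2
    have htake1 : arr.take (k + 1) = arr.take k ++ [x] := by
      rw [List.take_add_one, hget]; rfl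
    have hsplit : arr = arr.take k ++ x :: rest := by
      conv_lhs => rw [← List.take_append_drop k arr, h]
    rw [PySem.List.enumerate_cons]
    simp only [pvBLoop]
    by_cases hmem : x ∈ arr.take k
    · -- not a first occurrence: B skips; dedupNew skips
      have hidx : Option.map (fun k : Nat => (k : Int)) (PySem.List.index? arr x)
          ≠ some (k : Int) := by
        cases hi : PySem.List.index? arr x with
        | none => simp
        | some m =>
          simp only [Option.map_some, ne_eq, Option.some.injEq]
          intro hc
          have hm : m = k := by exact_mod_cast hc
          subst hm
          obtain ⟨pre, suf, heq, hlen, hnot⟩ := (PySem.List.index?_eq_some_iff arr x m).mp hi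
          have hpre : pre = arr.take m := by
            have h3 : (pre ++ x :: suf).take pre.length = pre := List.take_left
            rw [← heq, hlen] at h3; exact h3.symm
          exact hnot (hpre ▸ hmem)
      rw [if_neg hidx]
      have hcont : PySem.Set.contains (PySem.Set.ofList (arr.take k)) x = true := by
        rw [PySem.Set.contains_iff, PySem.Set.mem_ofList]; exact hmem
      have hset : PySem.Set.ofList (arr.take (k + 1)) = PySem.Set.ofList (arr.take k) := by
        rw [htake1, PySem.Set.ofList_append_singleton,
            PySem.Set.add_of_mem (by rw [PySem.Set.mem_ofList]; exact hmem)]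
      have hih := ih (k + 1) pos hdrop1
      rw [hset] at hih
      push_cast at hih
      rw [hih]
      simp [pvDedupNew, hmem]
    · -- first occurrence
      have hidx : PySem.List.index? arr x = some k := by
        apply (PySem.List.index?_eq_some_iff arr x k).mpr
        exact ⟨arr.take k, rest, hsplit, List.length_take_of_le (by omega), hmem⟩
      have hslice : PySem.List.slice arr (some ((k : Int) + 1)) none = rest := by
        have h4 : ((k : Int) + 1) = ((k + 1 : Nat) : Int) := by push_cast; ring
        rw [h4, PySem.List.slice_from_natCast, hdrop1]
      have hcount : arr.count x = 1 + rest.count x := by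
        conv_lhs => rw [hsplit]
        rw [List.count_append, List.count_cons_self,
            List.count_eq_zero.mpr hmem]
        omega
      have hcont : PySem.Set.contains (PySem.Set.ofList (arr.take k)) x = false := by
        rw [Bool.eq_false_iff]
        intro hc
        rw [PySem.Set.contains_iff, PySem.Set.mem_ofList] at hc; exact hmem hc
      have hset : PySem.Set.add (PySem.Set.ofList (arr.take k)) x
          = PySem.Set.ofList (arr.take (k + 1)) := by
        rw [htake1, PySem.Set.ofList_append_singleton]
      rw [if_pos (by rw [hidx]; rfl), hslice]
      simp only [pvDedupNew, hcont, Bool.false_eq_true, if_false, pvScanP]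
      by_cases hrep : x ∈ rest
      · rw [if_pos hrep, if_pos (by
          have h5 : 0 < rest.count x := List.count_pos_iff.mpr hrep
          omega)]
      · rw [if_neg hrep, if_neg (by
          have h5 : rest.count x = 0 := List.count_eq_zero.mpr hrep
          omega)]
        have hih := ih (k + 1) (pos + 1) hdrop1
        push_cast at hih
        rw [hih, hset]

-- ===== VERDICT (by name: the statement is the Claim_ definition above) =====
theorem firstRepeated_spec : Claim_equal_firstRepeated := by
  intro arr n _
  unfold Spec_firstRepeated firstRepeated firstRepeated_alt
  simp only
  set d0 := arr.foldl (fun d element => d.insert element (0 : Int)) PySem.Dict.empty with hd0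
  set d := arr.foldl (fun d element => d.modify element 0 (· + 1)) d0 with hd
  have hcount : ∀ e, d.getD e 0 = arr.count e := by
    intro e
    rw [hd, PySem.Dict.getD_foldl_modify_add_one,
        pvGetD_insert0 arr e PySem.Dict.empty (by simp [PySem.Dict.getD_empty])]
    simp
  have hkeys : d.keys = PySem.Set.ofList arr := by
    rw [hd, PySem.Dict.keys_foldl_modify, hd0, PySem.Dict.keys_foldl_insert]
    have h0 : (PySem.Dict.empty : PySem.Dict Int Int).keys = ([] : List Int) := rfl
    rw [h0, PySem.Set.update_nil_left, pvUpdate_ofList_self]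
  have hB : pvBLoop arr (PySem.List.enumerate arr 0) 1
      = pvScanP arr (PySem.Set.ofList arr) 1 := by
    have h0 := pvBLoop_eq_scanP arr arr 0 1 rfl
    norm_num at h0
    have he : ([] : PySem.Set Int) = PySem.Set.empty := rfl
    rw [h0, he, pvDedupNew_nil]
  rw [pvScanA_eq_scanP arr d hcount, hkeys, hB]
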